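-- pv_equiv track=rewrite | github.com/khaneun/kitty | kitty_night/feedback/store.py | _find_recurring_patterns
-- ===== SOURCE A (Python) =====
-- from collections import Counter
--
-- RECURRING_THRESHOLD = 2    # 반복 이슈로 승격하는 최소 등장 횟수
--
-- def _extract_keywords(text: str) -> set[str]:
--     """피드백 텍스트에서 핵심 키워드/구문을 추출 (간단한 n-gram 기반)"""
--     if not text:
--         return set()
--     # 소문자 변환 후 불용어 제거
--     words = text.lower().replace(",", " ").replace(".", " ").split()
--     stop_words = {
--         "the", "a", "an", "is", "are", "was", "were", "be", "been", "being",
--         "and", "or", "but", "for", "to", "of", "in", "on", "at", "by", "with",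
--         "from", "that", "this", "it", "as", "if", "when", "than", "more", "not",
--         "no", "do", "should", "would", "could", "can", "will", "may", "need",
--         "also", "only", "just", "even", "still", "very", "too", "so", "such",
--     }
--     filtered = [w for w in words if w not in stop_words and len(w) > 2]
--     # 2-gram 추출
--     keywords: set[str] = set()
--     for i in range(len(filtered)):
--         keywords.add(filtered[i])
--         if i + 1 < len(filtered):
--             keywords.add(f"{filtered[i]} {filtered[i+1]}")
--     return keywords
--
-- def _find_recurring_patterns(
--     items: list[str], threshold: int = RECURRING_THRESHOLD,
-- ) -> list[str]:
--     """유사한 피드백을 그룹핑하여 반복 패턴을 찾음"""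
--     if len(items) < threshold:
--         return []
--
--     # 각 항목의 키워드 추출
--     item_keywords = [(item, _extract_keywords(item)) for item in items]
--
--     # 2-gram 빈도 카운팅
--     bigram_counter: Counter[str] = Counter()
--     for _, kws in item_keywords:
--         bigrams = [k for k in kws if " " in k]
--         bigram_counter.update(bigrams)
--
--     # 빈도 높은 bigram을 포함하는 원본 항목을 대표로 선택
--     recurring: list[str] = []
--     used_indices: set[int] = set()
--
--     for bigram, count in bigram_counter.most_common():
--         if count < threshold:
--             break
--         # 이 bigram을 포함하는 가장 최근 항목을 대표로
--         for idx in range(len(items) - 1, -1, -1):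
--             if idx not in used_indices and bigram in _extract_keywords(items[idx]):
--                 recurring.append(f"({count}x) {items[idx]}")
--                 used_indices.add(idx)
--                 break
--
--     # bigram으로 못 잡은 단독 반복 키워드도 체크
--     word_counter: Counter[str] = Counter()
--     for _, kws in item_keywords:
--         singles = [k for k in kws if " " not in k and len(k) > 4]
--         word_counter.update(singles)
--
--     for word, count in word_counter.most_common(5):
--         if count < threshold + 1:  # 단일 단어는 더 높은 임계치
--             break
--         for idx in range(len(items) - 1, -1, -1):
--             if idx not in used_indices and word in items[idx].lower():
--                 recurring.append(f"({count}x) {items[idx]}")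
--                 used_indices.add(idx)
--                 break
--
--     return recurring[:5]  # 최대 5개
-- ===== SOURCE B (Python) =====
-- from collections import Counter, defaultdict
--
-- RECURRING_THRESHOLD = 2
--
-- _STOP_WORDS = frozenset({
--     "the", "a", "an", "is", "are", "was", "were", "be", "been", "being",
--     "and", "or", "but", "for", "to", "of", "in", "on", "at", "by", "with",
--     "from", "that", "this", "it", "as", "if", "when", "than", "more", "not",
--     "no", "do", "should", "would", "could", "can", "will", "may", "need",
--     "also", "only", "just", "even", "still", "very", "too", "so", "such",
-- })
--
--
-- def _extract_parts(text):
--     """(bigrams, long single words) of one item, deduped in first-occurrence order."""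
--     if not text:
--         return [], []
--     toks = text.lower().replace(",", " ").replace(".", " ").split()
--     filtered = [w for w in toks if w not in _STOP_WORDS and len(w) > 2]
--     bigrams = list(dict.fromkeys(x + " " + y for x, y in zip(filtered, filtered[1:])))
--     words = [w for w in dict.fromkeys(filtered) if len(w) > 4]
--     return bigrams, words
--
--
-- def _take_ge(pairs, bound):
--     """longest prefix of (key, count) pairs whose count is >= bound."""
--     out = []
--     for kv in pairs:
--         if kv[1] < bound:
--             break
--         out.append(kv)
--     return out
--
--
-- def _find_recurring_patterns(items, threshold=RECURRING_THRESHOLD):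
--     if len(items) < threshold:
--         return []
--
--     # one extraction pass; keyword sets are never recomputed
--     parts = [_extract_parts(it) for it in items]
--
--     # both counters in a single pass over the extracted parts
--     bigram_counter = Counter()
--     word_counter = Counter()
--     for bgs, ws in parts:
--         bigram_counter.update(bgs)
--         word_counter.update(ws)
--
--     n = len(items)
--     # inverted index: bigram -> item indices, most recent first
--     rindex = defaultdict(list)
--     for idx in range(n - 1, -1, -1):
--         for bg in parts[idx][0]:
--             rindex[bg].append(idx)
--
--     lowered = [it.lower() for it in items]
--
--     # one unified candidate list: (count, posting list of indices, most recent first)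
--     candidates = [
--         (count, rindex[bg])
--         for bg, count in _take_ge(bigram_counter.most_common(), threshold)
--     ] + [
--         (count, [i for i in range(n - 1, -1, -1) if word in lowered[i]])
--         for word, count in _take_ge(word_counter.most_common(5), threshold + 1)
--     ]
--
--     # one selection loop, stopping as soon as 5 representatives are found
--     recurring = []
--     used = set()
--     for count, postings in candidates:
--         if len(recurring) == 5:
--             break
--         for idx in postings:
--             if idx not in used:
--                 used.add(idx)
--                 recurring.append(f"({count}x) {items[idx]}")
--                 break
--     return recurring
-- ===== Notes on version B (the rewrite author's own statement) =====
-- stated objective: alternative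
-- what changed: B extracts each item's keywords once (bigrams built directly from adjacent word pairs instead of filtering an interleaved set), fills both counters in one pass, and replaces A's two staged break-loops (each rescanning all items per candidate) plus final [:5] slice by one unified candidate list (count, posting list) fed from an inverted index bigram -> most-recent-first item indices and a single selection loop that stops as soon as 5 representatives are found.
import Mathlib
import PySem

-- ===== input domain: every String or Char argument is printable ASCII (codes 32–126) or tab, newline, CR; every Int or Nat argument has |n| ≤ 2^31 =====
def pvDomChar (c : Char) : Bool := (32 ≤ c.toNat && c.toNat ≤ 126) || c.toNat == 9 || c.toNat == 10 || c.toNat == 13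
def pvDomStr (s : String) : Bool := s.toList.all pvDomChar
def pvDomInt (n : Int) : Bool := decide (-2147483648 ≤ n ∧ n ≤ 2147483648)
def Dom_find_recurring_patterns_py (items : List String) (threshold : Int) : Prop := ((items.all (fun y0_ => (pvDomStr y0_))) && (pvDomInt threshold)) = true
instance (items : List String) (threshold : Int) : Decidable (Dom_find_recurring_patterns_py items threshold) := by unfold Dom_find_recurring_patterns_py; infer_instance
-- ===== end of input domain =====

-- B replaces A's staged selection (two break-loops, each re-running _extract_keywords or a full
-- reverse scan per candidate, followed by a final [:5] slice) by one extraction pass, fused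
-- counters, an inverted index bigram → most-recent-first item indices, one unified candidate list
-- (count, posting list) and a single selection loop that stops at 5; objective: alternative.

-- shared module constant: the stop-word set (membership only)
def pvStop : List String := ["the", "a", "an", "is", "are", "was", "were", "be", "been", "being",
  "and", "or", "but", "for", "to", "of", "in", "on", "at", "by", "with",
  "from", "that", "this", "it", "as", "if", "when", "than", "more", "not",
  "no", "do", "should", "would", "could", "can", "will", "may", "need",
  "also", "only", "just", "even", "still", "very", "too", "so", "such"]

-- Counter.update(xs): add 1 to each key, new keys appended in first-seen order (both Pythons call it)
def counterUpdate (d : PySem.Dict String Int) (l : List String) : PySem.Dict String Int :=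
  l.foldl (fun d k => d.modify k 0 (· + 1)) d

-- ===== PORT A =====

-- _extract_keywords: set of filtered words and adjacent 2-grams, built by the indexed loop
def extractKeywordsA (text : String) : PySem.Set String :=
  if text = "" then PySem.Set.empty
  else
    let words := PySem.Str.split₀ (PySem.Str.replace (PySem.Str.replace (PySem.Str.lower text) "," " ") "." " ")
    let filtered := words.filter (fun w => !pvStop.contains w && decide (2 < PySem.Str.len w))
    (List.range filtered.length).foldl
      (fun kws i =>
        let kws := PySem.Set.add kws (filtered.getD i "")
        if i + 1 < filtered.length then
          PySem.Set.add kws (filtered.getD i "" ++ " " ++ filtered.getD (i + 1) "")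
        else kws)
      PySem.Set.empty

-- 'for bigram, count in bigram_counter.most_common(): … break' with the reverse index scan
def selLoopA (items : List String) (threshold : Int) :
    List (String × Int) → List String → PySem.Set Nat → List String × PySem.Set Nat
  | [], recurring, used => (recurring, used)
  | (bigram, count) :: rest, recurring, used =>
    if count < threshold then (recurring, used)
    else
      match (List.range items.length).reverse.find?
          (fun idx => !PySem.Set.contains used idx && PySem.Set.contains (extractKeywordsA (items.getD idx "")) bigram) with
      | some idx =>
        selLoopA items threshold rest
          (recurring ++ ["(" ++ PySem.Int.toStr count ++ "x) " ++ items.getD idx ""])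
          (PySem.Set.add used idx)
      | none => selLoopA items threshold rest recurring used

-- 'for word, count in word_counter.most_common(5): … break' with the substring test on items[idx].lower()
def wordLoopA (items : List String) (threshold : Int) :
    List (String × Int) → List String → PySem.Set Nat → List String × PySem.Set Nat
  | [], recurring, used => (recurring, used)
  | (word, count) :: rest, recurring, used =>
    if count < threshold + 1 then (recurring, used)
    else
      match (List.range items.length).reverse.find?
          (fun idx => !PySem.Set.contains used idx && PySem.Str.isIn word (PySem.Str.lower (items.getD idx ""))) with
      | some idx =>
        wordLoopA items threshold rest
          (recurring ++ ["(" ++ PySem.Int.toStr count ++ "x) " ++ items.getD idx ""])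
          (PySem.Set.add used idx)
      | none => wordLoopA items threshold rest recurring used

def find_recurring_patterns_py (items : List String) (threshold : Int) : List String :=
  if PySem.List.len items < threshold then []
  else
    let item_keywords := items.map (fun item => (item, extractKeywordsA item))
    let bigram_counter := item_keywords.foldl
      (fun c p => counterUpdate c (p.2.filter (fun k => PySem.Str.isIn " " k))) PySem.Dict.empty
    -- most_common() = items sorted by count, descending, stable
    let pr := selLoopA items threshold (PySem.List.sorted bigram_counter.items (fun p => p.2) true) [] PySem.Set.empty
    let word_counter := item_keywords.foldl
      (fun c p => counterUpdate c (p.2.filter (fun k => !PySem.Str.isIn " " k && decide (4 < PySem.Str.len k)))) PySem.Dict.empty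
    -- most_common(5) = the first 5 of the same stable descending order
    let pr2 := wordLoopA items threshold ((PySem.List.sorted word_counter.items (fun p => p.2) true).take 5) pr.1 pr.2
    PySem.List.slice pr2.1 none (some 5)

-- ===== PORT B =====

-- _extract_parts: (bigrams, long words) of one item, each deduped in first-occurrence order
def extractPartsB (text : String) : List String × List String :=
  if text = "" then ([], [])
  else
    let toks := PySem.Str.split₀ (PySem.Str.replace (PySem.Str.replace (PySem.Str.lower text) "," " ") "." " ")
    let filtered := toks.filter (fun w => !pvStop.contains w && decide (2 < PySem.Str.len w))
    let bigrams := PySem.List.dedup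
      ((filtered.zip (PySem.List.slice filtered (some 1) none)).map (fun p => p.1 ++ " " ++ p.2))
    let words := (PySem.List.dedup filtered).filter (fun w => decide (4 < PySem.Str.len w))
    (bigrams, words)

-- _take_ge: longest prefix of (key, count) pairs whose count is >= bound
def takeGeB (bound : Int) : List (String × Int) → List (String × Int)
  | [] => []
  | kv :: rest => if kv.2 < bound then [] else kv :: takeGeB bound rest

-- inverted index: bigram → item indices, most recent first (defaultdict(list) of appends)
def rindexB (parts : List (List String × List String)) (n : Nat) : PySem.Dict String (List Nat) :=
  (List.range n).reverse.foldl
    (fun d idx => (parts.getD idx ([], [])).1.foldl (fun d bg => d.modify bg [] (· ++ [idx])) d)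
    PySem.Dict.empty

-- the single selection loop over (count, postings) candidates, stopping at 5 representatives
def pickLoopB (items : List String) :
    List (Int × List Nat) → List String → PySem.Set Nat → List String
  | [], recurring, _ => recurring
  | (count, postings) :: rest, recurring, used =>
    if recurring.length == 5 then recurring
    else
      match postings.find? (fun idx => !PySem.Set.contains used idx) with
      | some idx =>
        pickLoopB items rest
          (recurring ++ ["(" ++ PySem.Int.toStr count ++ "x) " ++ items.getD idx ""])
          (PySem.Set.add used idx)
      | none => pickLoopB items rest recurring used

def find_recurring_patterns_py_alt (items : List String) (threshold : Int) : List String :=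
  if PySem.List.len items < threshold then []
  else
    let parts := items.map extractPartsB
    -- both counters in a single pass over the extracted parts
    let ctrs := parts.foldl (fun c p => (counterUpdate c.1 p.1, counterUpdate c.2 p.2))
      (PySem.Dict.empty, PySem.Dict.empty)
    let n := items.length
    let rindex := rindexB parts n
    let lowered := items.map PySem.Str.lower
    -- one unified candidate list: (count, posting list of indices, most recent first)
    let candidates :=
      (takeGeB threshold (PySem.List.sorted ctrs.1.items (fun p => p.2) true)).map
        (fun kv => (kv.2, rindex.getD kv.1 []))
      ++ (takeGeB (threshold + 1) ((PySem.List.sorted ctrs.2.items (fun p => p.2) true).take 5)).map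
        (fun kv => (kv.2, (List.range n).reverse.filter
          (fun i => PySem.Str.isIn kv.1 (lowered.getD i ""))))
    pickLoopB items candidates [] PySem.Set.empty

-- ===== PRECONDITION & SPEC =====

-- Pre_ helpers: the multiset of per-item (deduped) 2-grams / long words a reader can compute per item
def pvFilteredOf (text : String) : List String :=
  (PySem.Str.split₀ (PySem.Str.replace (PySem.Str.replace (PySem.Str.lower text) "," " ") "." " ")).filter
    (fun w => !pvStop.contains w && decide (2 < PySem.Str.len w))

def pvBigramsOf (text : String) : List String :=
  PySem.List.dedup (((pvFilteredOf text).zip ((pvFilteredOf text).drop 1)).map (fun p => p.1 ++ " " ++ p.2))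

def pvWordsOf (text : String) : List String :=
  (PySem.List.dedup (pvFilteredOf text)).filter (fun w => decide (4 < PySem.Str.len w))

-- no two distinct keys with the same count at/above the bound first occur in the same item
def pvTieFree (ls : List (List String)) (bound : Int) : Prop :=
  ∀ b1 ∈ ls.flatten, ∀ b2 ∈ ls.flatten, b1 ≠ b2 →
    ls.flatten.count b1 = ls.flatten.count b2 → bound ≤ (ls.flatten.count b1 : Int) →
    ls.findIdx? (fun l => l.contains b1) ≠ ls.findIdx? (fun l => l.contains b2)

-- Pre_ excludes inputs on which A's output hangs on Python's set/Counter tie order (hash-dependent):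
-- two distinct bigrams (resp. long words) with equal counts at/above the acting threshold first
-- occurring in the same item; there Counter.most_common's tie order is an accident of str hashing.
def Pre_find_recurring_patterns_py (items : List String) (threshold : Int) : Prop :=
  pvTieFree (items.map pvBigramsOf) threshold ∧ pvTieFree (items.map pvWordsOf) (threshold + 1)

instance (items : List String) (threshold : Int) : Decidable (Pre_find_recurring_patterns_py items threshold) := by
  unfold Pre_find_recurring_patterns_py pvTieFree; infer_instance

def pvWitness_find_recurring_patterns_py : List String × Int := (["login bug", "login bug"], 2)

def Spec_find_recurring_patterns_py (items : List String) (threshold : Int) (out : List String) : Prop := out = find_recurring_patterns_py_alt items threshold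
instance (items : List String) (threshold : Int) (out : List String) : Decidable (Spec_find_recurring_patterns_py items threshold out) := by unfold Spec_find_recurring_patterns_py; infer_instance

-- ===== CLAIM (what is proved, stated in full; the proofs are below) =====
def Claim_equal_find_recurring_patterns_py : Prop := ∀ (items : List String) (threshold : Int), Dom_find_recurring_patterns_py items threshold → Pre_find_recurring_patterns_py items threshold → Spec_find_recurring_patterns_py items threshold (find_recurring_patterns_py items threshold)

-- ===== LEMMAS AND PROOFS =====

def interA : List String → List String
  | [] => []
  | [x] => [x]
  | x :: y :: t => x :: (x ++ " " ++ y) :: interA (y :: t)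

-- the indexed set-building loop of _extract_keywords, as a function of the filtered list
def pvFoldA (f : List String) (s : PySem.Set String) : PySem.Set String :=
  (List.range f.length).foldl
    (fun kws i =>
      let kws := PySem.Set.add kws (f.getD i "")
      if i + 1 < f.length then
        PySem.Set.add kws (f.getD i "" ++ " " ++ f.getD (i + 1) "")
      else kws)
    s

theorem pvFoldA_cons (x : String) (t : List String) (s : PySem.Set String) :
    pvFoldA (x :: t) s = pvFoldA t
      (if 0 + 1 < (x :: t).length then
          PySem.Set.add (PySem.Set.add s x) (x ++ " " ++ t.getD 0 "")
        else PySem.Set.add s x) := by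
  unfold pvFoldA
  rw [List.length_cons, List.range_succ_eq_map, List.foldl_cons, List.foldl_map]
  simp only [List.getD_cons_zero, List.getD_cons_succ, Nat.succ_lt_succ_iff, Nat.zero_add]

theorem pvFoldA_eq_update (f : List String) (s : PySem.Set String) :
    pvFoldA f s = PySem.Set.update s (interA f) := by
  induction f using interA.induct generalizing s with
  | case1 => simp [pvFoldA, interA, PySem.Set.update]
  | case2 x =>
    rw [pvFoldA_cons]
    simp [pvFoldA, interA, PySem.Set.update_cons, PySem.Set.update_nil]
  | case3 x y t ih =>
    rw [pvFoldA_cons, ih]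
    simp [interA, PySem.Set.update_cons]

theorem extractKeywordsA_eq (text : String) :
    extractKeywordsA text = PySem.Set.ofList (interA (pvFilteredOf text)) := by
  have hrepr : extractKeywordsA text =
      if text = "" then PySem.Set.empty else pvFoldA (pvFilteredOf text) PySem.Set.empty := rfl
  rw [hrepr]
  by_cases h : text = ""
  · rw [if_pos h, h]; decide
  · rw [if_neg h, pvFoldA_eq_update, PySem.Set.update_empty]

-- every word produced by str.split() is free of whitespace, in particular of ' '
theorem split₀go_no_space (s cur : List Char) (acc : List (List Char))
    (hc : ∀ c ∈ cur, PySem.Chars.isspace c = false)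
    (ha : ∀ w ∈ acc, ∀ c ∈ w, PySem.Chars.isspace c = false) :
    ∀ w ∈ PySem.Chars.split₀.go s cur acc, ∀ c ∈ w, PySem.Chars.isspace c = false := by
  induction s generalizing cur acc with
  | nil =>
    intro w hw
    unfold PySem.Chars.split₀.go at hw
    split at hw
    · exact ha w (List.mem_reverse.mp hw)
    · rcases List.mem_cons.mp (List.mem_reverse.mp hw) with h | h
      · subst h; intro c hcm; exact hc c (List.mem_reverse.mp hcm)
      · exact ha w h
  | cons d rest ih =>
    intro w hw
    unfold PySem.Chars.split₀.go at hw
    by_cases hsp : PySem.Chars.isspace d = true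
    · rw [if_pos hsp] at hw
      split at hw
      · exact ih [] acc (by simp) ha w hw
      · refine ih [] (cur.reverse :: acc) (by simp) ?_ w hw
        intro v hv
        rcases List.mem_cons.mp hv with h | h
        · subst h; intro c hcm; exact hc c (List.mem_reverse.mp hcm)
        · exact ha v h
    · rw [if_neg hsp] at hw
      refine ih (d :: cur) acc ?_ ha w hw
      intro c hcm
      rcases List.mem_cons.mp hcm with h | h
      · simpa [h] using Bool.eq_false_iff.mpr hsp
      · exact hc c h

theorem split₀_no_space (s : String) :
    ∀ w ∈ PySem.Str.split₀ s, PySem.Str.isIn " " w = false := by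
  intro w hw
  apply Bool.eq_false_iff.mpr
  intro hin
  rw [PySem.Str.isIn_iff_infix] at hin
  have hmem : (' ' : Char) ∈ w.toList := hin.subset (by decide)
  have hw' : w.toList ∈ PySem.Chars.split₀ s.toList := by
    rw [← PySem.Str.split₀_map_toList]
    exact List.mem_map_of_mem hw
  have := split₀go_no_space s.toList [] [] (by simp) (by simp) w.toList hw' ' ' hmem
  simp [PySem.Chars.isspace] at this

theorem bigram_has_space (a b : String) : PySem.Str.isIn " " (a ++ " " ++ b) = true := by
  rw [PySem.Str.isIn_iff_infix]
  exact ⟨a.toList, b.toList, by simp [String.toList_append]⟩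

theorem filter_ofList (p : String → Bool) (xs : List String) :
    (PySem.Set.ofList xs).filter p = PySem.Set.ofList (xs.filter p) := by
  induction xs with
  | nil => rfl
  | cons x xs ih =>
    rw [PySem.Set.ofList_cons, List.filter_cons]
    by_cases hp : p x = true
    · rw [if_pos hp, List.filter_cons, if_pos hp, PySem.Set.ofList_cons, ← ih]
      simp only [PySem.Set.discard, List.filter_filter]
      exact congrArg _ (List.filter_congr fun a _ => by rw [Bool.and_comm])
    · rw [if_neg hp, List.filter_cons, if_neg hp, ← ih]
      simp only [PySem.Set.discard, List.filter_filter]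
      refine List.filter_congr fun a _ => ?_
      by_cases hax : a = x
      · subst hax
        have : p a = false := Bool.eq_false_iff.mpr hp
        simp [this]
      · simp [hax]

def bgSeq (f : List String) : List String :=
  (f.zip (f.drop 1)).map (fun p => p.1 ++ " " ++ p.2)

theorem bgSeq_cons_cons (x y : String) (t : List String) :
    bgSeq (x :: y :: t) = (x ++ " " ++ y) :: bgSeq (y :: t) := by
  simp [bgSeq]

theorem interA_filter_space (ps : String → Bool) (f : List String)
    (hf : ∀ w ∈ f, ps w = false) (hbg : ∀ a b : String, ps (a ++ " " ++ b) = true) :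
    (interA f).filter ps = bgSeq f := by
  induction f using interA.induct with
  | case1 => rfl
  | case2 x => simp [interA, bgSeq, hf x (by simp)]
  | case3 x y t ih =>
    rw [interA, bgSeq_cons_cons]
    simp [hf x (by simp), hbg, ih (fun w hw => hf w (List.mem_cons_of_mem x hw))]

theorem interA_filter_nospace (ps q : String → Bool) (f : List String)
    (hf : ∀ w ∈ f, ps w = false) (hbg : ∀ a b : String, ps (a ++ " " ++ b) = true) :
    (interA f).filter (fun k => !ps k && q k) = f.filter q := by
  induction f using interA.induct with
  | case1 => rfl
  | case2 x => simp [interA, List.filter_cons, hf x (by simp)]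
  | case3 x y t ih =>
    rw [interA]
    simp only [List.filter_cons, hf x (by simp), hbg, Bool.not_true, Bool.not_false,
      Bool.false_and, Bool.true_and, if_false, Bool.false_eq_true,
      ih (fun w hw => hf w (List.mem_cons_of_mem x hw))]

theorem pvFilteredOf_no_space (text : String) :
    ∀ w ∈ pvFilteredOf text, PySem.Str.isIn " " w = false := by
  intro w hw
  exact split₀_no_space _ w (List.mem_filter.mp hw).1

theorem extractA_filter_space (text : String) :
    (extractKeywordsA text).filter (fun k => PySem.Str.isIn " " k) = (extractPartsB text).1 := by
  rw [extractKeywordsA_eq, filter_ofList,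
    interA_filter_space _ _ (pvFilteredOf_no_space text) bigram_has_space]
  by_cases h : text = ""
  · rw [h]; decide
  · show _ = (extractPartsB text).1
    unfold extractPartsB
    rw [if_neg h]
    simp only [PySem.List.dedup_eq_ofList, PySem.List.slice_from_one, ← List.drop_one]
    rfl

theorem extractA_filter_words (text : String) :
    (extractKeywordsA text).filter (fun k => !PySem.Str.isIn " " k && decide (4 < PySem.Str.len k))
      = (extractPartsB text).2 := by
  rw [extractKeywordsA_eq, filter_ofList,
    interA_filter_nospace _ _ _ (pvFilteredOf_no_space text) bigram_has_space]
  by_cases h : text = ""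
  · rw [h]; decide
  · unfold extractPartsB
    rw [if_neg h]
    simp only [PySem.List.dedup_eq_ofList, filter_ofList]
    rfl

theorem foldl_nested {α β γ : Type} (l : List α) (g : α → List β) (h : γ → β → γ) (init : γ) :
    l.foldl (fun d a => (g a).foldl h d) init = (l.flatMap g).foldl h init := by
  induction l generalizing init with
  | nil => rfl
  | cons a l ih => rw [List.foldl_cons, List.flatMap_cons, List.foldl_append, ih]

-- a fold whose state is a pair of independently updated components splits into two folds
theorem foldl_pair {α β γ : Type} (l : List α) (f : β → α → β) (g : γ → α → γ) (b : β) (c : γ) :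
    l.foldl (fun p a => (f p.1 a, g p.2 a)) (b, c) = (l.foldl f b, l.foldl g c) := by
  induction l generalizing b c with
  | nil => rfl
  | cons a l ih => rw [List.foldl_cons, List.foldl_cons, List.foldl_cons, ih]

theorem foldl_pair_counter (parts : List (List String × List String)) :
    parts.foldl (fun c p => (counterUpdate c.1 p.1, counterUpdate c.2 p.2))
        (PySem.Dict.empty, PySem.Dict.empty)
      = (parts.foldl (fun c p => counterUpdate c p.1) PySem.Dict.empty,
         parts.foldl (fun c p => counterUpdate c p.2) PySem.Dict.empty) :=
  foldl_pair parts (fun c p => counterUpdate c p.1) (fun c p => counterUpdate c p.2) _ _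

theorem counters_eq_bigram (items : List String) (d : PySem.Dict String Int) :
    (items.map (fun item => (item, extractKeywordsA item))).foldl
        (fun c p => counterUpdate c (p.2.filter (fun k => PySem.Str.isIn " " k))) d
      = (items.map extractPartsB).foldl (fun c p => counterUpdate c p.1) d := by
  rw [List.foldl_map, List.foldl_map]
  apply PySem.List.foldl_congr_mem
  intro acc x _
  rw [extractA_filter_space]

theorem counters_eq_word (items : List String) (d : PySem.Dict String Int) :
    (items.map (fun item => (item, extractKeywordsA item))).foldl
        (fun c p => counterUpdate c (p.2.filter (fun k => !PySem.Str.isIn " " k && decide (4 < PySem.Str.len k)))) d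
      = (items.map extractPartsB).foldl (fun c p => counterUpdate c p.2) d := by
  rw [List.foldl_map, List.foldl_map]
  apply PySem.List.foldl_congr_mem
  intro acc x _
  rw [extractA_filter_words]

theorem foldl_counterUpdate_fst (parts : List (List String × List String)) :
    parts.foldl (fun c p => counterUpdate c p.1) PySem.Dict.empty
      = PySem.Dict.counter (parts.flatMap (·.1)) := by
  unfold counterUpdate
  rw [PySem.Dict.counter_eq_foldl, ← foldl_nested]

theorem mem_partsB1_space (it x : String) (hx : x ∈ (extractPartsB it).1) :
    PySem.Str.isIn " " x = true := by
  rw [← extractA_filter_space] at hx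
  exact (List.mem_filter.mp hx).2

theorem partsB1_nodup (it : String) : (extractPartsB it).1.Nodup := by
  rw [← extractA_filter_space, extractKeywordsA_eq, filter_ofList]
  exact PySem.Set.nodup_ofList _

theorem containsA_eq_containsB (it bg : String) (hsp : PySem.Str.isIn " " bg = true) :
    PySem.Set.contains (extractKeywordsA it) bg = (extractPartsB it).1.contains bg := by
  rw [← extractA_filter_space]
  rw [Bool.eq_iff_iff, PySem.Set.contains_iff, List.contains_iff_mem, List.mem_filter]
  exact ⟨fun h => ⟨h, hsp⟩, fun h => h.1⟩

theorem find?_and_eq_filter_find? {α : Type} (l : List α) (p q : α → Bool) :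
    l.find? (fun a => p a && q a) = (l.filter q).find? p := by
  induction l with
  | nil => rfl
  | cons a l ih =>
    by_cases hq : q a = true
    · by_cases hp : p a = true
      · simp [hp, hq]
      · have hp' : p a = false := Bool.eq_false_iff.mpr hp
        simp [hp', hq, ih]
    · have hq' : q a = false := Bool.eq_false_iff.mpr hq
      simp [hq', ih]

theorem filter_flatMap' {α β : Type} (l : List α) (g : α → List β) (p : β → Bool) :
    (l.flatMap g).filter p = l.flatMap (fun a => (g a).filter p) := by
  induction l with
  | nil => rfl
  | cons a l ih => rw [List.flatMap_cons, List.flatMap_cons, List.filter_append, ih]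

theorem flatMap_if_singleton {α : Type} (l : List α) (c : α → Bool) :
    l.flatMap (fun a => if c a then [a] else []) = l.filter c := by
  induction l with
  | nil => rfl
  | cons a l ih =>
    rw [List.flatMap_cons, List.filter_cons, ih]
    by_cases h : c a = true <;> simp [h]

theorem count_filter_beq (bs : List String) (bg : String) (hnd : bs.Nodup) :
    bs.filter (· == bg) = if bs.contains bg then [bg] else [] := by
  induction bs with
  | nil => rfl
  | cons b bs ih =>
    obtain ⟨hb, hnd'⟩ := List.nodup_cons.mp hnd
    rw [List.filter_cons]
    by_cases h : b = bg
    · subst h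
      have hf : bs.filter (· == b) = [] := by
        rw [List.filter_eq_nil_iff]
        intro x hx
        simp only [beq_iff_eq]
        exact fun he => hb (he ▸ hx)
      simp [hf]
    · have hbeq : (b == bg) = false := by simpa using h
      have hcont : (b :: bs).contains bg = bs.contains bg := by
        rw [Bool.eq_iff_iff, List.contains_iff_mem, List.contains_iff_mem]
        simp [Ne.symm h]
      rw [ih hnd', hbeq, hcont]
      simp

theorem parts_getD (items : List String) (idx : Nat) :
    (items.map extractPartsB).getD idx ([], []) = extractPartsB (items.getD idx "") := by
  rw [List.getD_eq_getElem?_getD, List.getD_eq_getElem?_getD, List.getElem?_map]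
  cases items[idx]? with
  | none => decide
  | some s => rfl

theorem rindexB_getD (items : List String) (bg : String) :
    (rindexB (items.map extractPartsB) items.length).getD bg []
      = (List.range items.length).reverse.filter
          (fun idx => ((items.map extractPartsB).getD idx ([], [])).1.contains bg) := by
  unfold rindexB
  have hstep : (List.range items.length).reverse.foldl
      (fun d idx => ((items.map extractPartsB).getD idx ([], [])).1.foldl
        (fun d bg' => d.modify bg' [] (· ++ [idx])) d) PySem.Dict.empty
    = ((List.range items.length).reverse.flatMap
        (fun idx => ((items.map extractPartsB).getD idx ([], [])).1.map (fun b => (b, idx)))).foldl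
        (fun d p => d.modify p.1 [] (· ++ [p.2])) PySem.Dict.empty := by
    rw [← foldl_nested]
    apply PySem.List.foldl_congr_mem
    intro d idx _
    rw [List.foldl_map]
  rw [hstep, PySem.Dict.getD_foldl_modify_append, PySem.Dict.getD_empty, List.nil_append,
    filter_flatMap', List.map_flatMap]
  have hper : ∀ idx : Nat,
      ((((items.map extractPartsB).getD idx ([], [])).1.map (fun b => (b, idx))).filter
        (fun p => p.1 == bg)).map (·.2)
      = if ((items.map extractPartsB).getD idx ([], [])).1.contains bg then [idx] else [] := by
    intro idx
    rw [List.filter_map, List.map_map]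
    have hnd : ((items.map extractPartsB).getD idx ([], [])).1.Nodup := by
      rw [parts_getD]; exact partsB1_nodup _
    have : (((items.map extractPartsB).getD idx ([], [])).1.filter ((fun p => p.1 == bg) ∘ (fun b => (b, idx))))
        = ((items.map extractPartsB).getD idx ([], [])).1.filter (· == bg) := rfl
    rw [this, count_filter_beq _ _ hnd]
    by_cases hc : ((items.map extractPartsB).getD idx ([], [])).1.contains bg = true
    · rw [if_pos hc, if_pos hc]; rfl
    · rw [if_neg hc, if_neg hc]; rfl
  calc ((List.range items.length).reverse.flatMap fun idx =>
          ((((items.map extractPartsB).getD idx ([], [])).1.map (fun b => (b, idx))).filter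
            (fun p => p.1 == bg)).map (·.2))
      = (List.range items.length).reverse.flatMap (fun idx =>
          if ((items.map extractPartsB).getD idx ([], [])).1.contains bg then [idx] else []) := by
        exact congrArg (fun f => List.flatMap f (List.range items.length).reverse) (funext hper)
    _ = _ := flatMap_if_singleton _ _

-- the common shape of both of A's selection loops, abstracted to (count, posting list) candidates
def genLoop (items : List String) :
    List (Int × List Nat) → List String → PySem.Set Nat → List String × PySem.Set Nat
  | [], recurring, used => (recurring, used)
  | (count, postings) :: rest, recurring, used =>
    match postings.find? (fun idx => !PySem.Set.contains used idx) with
    | some idx =>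
      genLoop items rest
        (recurring ++ ["(" ++ PySem.Int.toStr count ++ "x) " ++ items.getD idx ""])
        (PySem.Set.add used idx)
    | none => genLoop items rest recurring used

theorem selLoopA_eq_gen (items : List String) (threshold : Int) (mc : List (String × Int))
    (hmc : ∀ p ∈ mc, PySem.Str.isIn " " p.1 = true) (recurring : List String) (used : PySem.Set Nat) :
    selLoopA items threshold mc recurring used
      = genLoop items ((takeGeB threshold mc).map
          (fun kv => (kv.2, (rindexB (items.map extractPartsB) items.length).getD kv.1 [])))
          recurring used := by
  induction mc generalizing recurring used with
  | nil => rfl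
  | cons p rest ih =>
    obtain ⟨bigram, count⟩ := p
    have hsp := hmc (bigram, count) (by simp)
    have ih' := fun r u => ih (fun q hq => hmc q (List.mem_cons_of_mem _ hq)) r u
    rw [selLoopA]
    simp only [takeGeB]
    by_cases hc : count < threshold
    · rw [if_pos hc, if_pos hc]; rfl
    · rw [if_neg hc, if_neg hc]
      simp only [List.map_cons]
      rw [genLoop]
      have hfind : (List.range items.length).reverse.find?
          (fun idx => !PySem.Set.contains used idx
            && PySem.Set.contains (extractKeywordsA (items.getD idx "")) bigram)
          = ((rindexB (items.map extractPartsB) items.length).getD bigram []).find?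
              (fun idx => !PySem.Set.contains used idx) := by
        have hps : (fun idx => !PySem.Set.contains used idx
              && PySem.Set.contains (extractKeywordsA (items.getD idx "")) bigram)
            = (fun idx => !PySem.Set.contains used idx
              && ((items.map extractPartsB).getD idx ([], [])).1.contains bigram) := by
          funext idx
          rw [containsA_eq_containsB _ _ hsp, parts_getD]
        rw [hps, find?_and_eq_filter_find?, ← rindexB_getD]
      rw [hfind]
      cases ((rindexB (items.map extractPartsB) items.length).getD bigram []).find?
          (fun idx => !PySem.Set.contains used idx) with
      | none => exact ih' _ _
      | some idx => exact ih' _ _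

theorem lowered_getD (items : List String) (idx : Nat) :
    (items.map PySem.Str.lower).getD idx "" = PySem.Str.lower (items.getD idx "") := by
  rw [List.getD_eq_getElem?_getD, List.getD_eq_getElem?_getD, List.getElem?_map]
  cases items[idx]? with
  | none => decide
  | some s => rfl

theorem wordLoopA_eq_gen (items : List String) (threshold : Int) (l : List (String × Int))
    (recurring : List String) (used : PySem.Set Nat) :
    wordLoopA items threshold l recurring used
      = genLoop items ((takeGeB (threshold + 1) l).map
          (fun kv => (kv.2, (List.range items.length).reverse.filter
            (fun i => PySem.Str.isIn kv.1 ((items.map PySem.Str.lower).getD i "")))))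
          recurring used := by
  induction l generalizing recurring used with
  | nil => rfl
  | cons p rest ih =>
    obtain ⟨word, count⟩ := p
    rw [wordLoopA]
    simp only [takeGeB]
    by_cases hc : count < threshold + 1
    · rw [if_pos hc, if_pos hc]; rfl
    · rw [if_neg hc, if_neg hc]
      simp only [List.map_cons]
      rw [genLoop]
      have hfind : (List.range items.length).reverse.find?
          (fun idx => !PySem.Set.contains used idx
            && PySem.Str.isIn word (PySem.Str.lower (items.getD idx "")))
          = ((List.range items.length).reverse.filter
              (fun i => PySem.Str.isIn word ((items.map PySem.Str.lower).getD i ""))).find?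
              (fun idx => !PySem.Set.contains used idx) := by
        rw [← find?_and_eq_filter_find?]
        exact congrArg (fun p => List.find? p (List.range items.length).reverse)
          (funext fun idx => by rw [lowered_getD])
      rw [hfind]
      cases ((List.range items.length).reverse.filter
          (fun i => PySem.Str.isIn word ((items.map PySem.Str.lower).getD i ""))).find?
          (fun idx => !PySem.Set.contains used idx) with
      | none => exact ih _ _
      | some idx => exact ih _ _

theorem genLoop_append (items : List String) (c1 c2 : List (Int × List Nat))
    (recurring : List String) (used : PySem.Set Nat) :
    genLoop items (c1 ++ c2) recurring used
      = genLoop items c2 (genLoop items c1 recurring used).1 (genLoop items c1 recurring used).2 := by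
  induction c1 generalizing recurring used with
  | nil => rfl
  | cons p rest ih =>
    obtain ⟨count, postings⟩ := p
    rw [List.cons_append, genLoop, genLoop]
    cases postings.find? (fun idx => !PySem.Set.contains used idx) with
    | none => exact ih _ _
    | some idx => exact ih _ _

theorem genLoop_acc_prefix (items : List String) (c : List (Int × List Nat))
    (recurring : List String) (used : PySem.Set Nat) :
    ∃ t, (genLoop items c recurring used).1 = recurring ++ t := by
  induction c generalizing recurring used with
  | nil => exact ⟨[], by simp [genLoop]⟩
  | cons p rest ih =>
    obtain ⟨count, postings⟩ := p
    rw [genLoop]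
    cases postings.find? (fun idx => !PySem.Set.contains used idx) with
    | none => exact ih _ _
    | some idx =>
      obtain ⟨t, ht⟩ := ih (recurring ++ ["(" ++ PySem.Int.toStr count ++ "x) " ++ items.getD idx ""]) (PySem.Set.add used idx)
      exact ⟨_, by rw [ht, List.append_assoc]⟩

-- stopping once 5 representatives are collected = taking the first 5 of the unbounded run
theorem pickLoopB_eq_take_genLoop (items : List String) (c : List (Int × List Nat))
    (recurring : List String) (used : PySem.Set Nat) (hle : recurring.length ≤ 5) :
    pickLoopB items c recurring used = ((genLoop items c recurring used).1).take 5 := by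
  induction c generalizing recurring used with
  | nil =>
    rw [pickLoopB, genLoop]
    exact (List.take_of_length_le hle).symm
  | cons p rest ih =>
    obtain ⟨count, postings⟩ := p
    rw [pickLoopB, genLoop]
    by_cases h5 : recurring.length = 5
    · have hb : (recurring.length == 5) = true := by simp [h5]
      rw [if_pos hb]
      have htake : ∀ (pr : List String × PySem.Set Nat),
          (∃ t, pr.1 = recurring ++ t) → pr.1.take 5 = recurring := by
        rintro pr ⟨t, ht⟩
        rw [ht, ← h5, List.take_left]
      cases hf : postings.find? (fun idx => !PySem.Set.contains used idx) with
      | none => exact (htake _ (genLoop_acc_prefix items rest recurring used)).symm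
      | some idx =>
        refine (htake _ ?_).symm
        obtain ⟨t, ht⟩ := genLoop_acc_prefix items rest
          (recurring ++ ["(" ++ PySem.Int.toStr count ++ "x) " ++ items.getD idx ""]) (PySem.Set.add used idx)
        exact ⟨_, by rw [ht, List.append_assoc]⟩
    · have hb : (recurring.length == 5) = false := by simp [h5]
      rw [if_neg (by simp [hb])]
      cases postings.find? (fun idx => !PySem.Set.contains used idx) with
      | none => exact ih _ _ hle
      | some idx =>
        refine ih _ _ ?_
        rw [List.length_append, List.length_cons, List.length_nil]
        omega

theorem sorted_bigram_space (items : List String) :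
    ∀ p ∈ PySem.List.sorted
        ((items.map extractPartsB).foldl (fun c p => counterUpdate c p.1) PySem.Dict.empty).items
        (fun p => p.2) true,
      PySem.Str.isIn " " p.1 = true := by
  intro p hp
  rw [PySem.List.mem_sorted] at hp
  rw [foldl_counterUpdate_fst, PySem.Dict.items_counter] at hp
  obtain ⟨k, hk, hkp⟩ := List.mem_map.mp hp
  have hk' : k ∈ (items.map extractPartsB).flatMap (·.1) := by simpa using hk
  obtain ⟨pr, _, hkpr⟩ := List.mem_flatMap.mp hk'
  obtain ⟨it, _, hit⟩ := List.mem_map.mp (by assumption : pr ∈ items.map extractPartsB)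
  subst hit
  have := mem_partsB1_space it k hkpr
  rw [← hkp]
  exact this

theorem find_recurring_patterns_py_eq_alt (items : List String) (threshold : Int) :
    find_recurring_patterns_py items threshold = find_recurring_patterns_py_alt items threshold := by
  unfold find_recurring_patterns_py find_recurring_patterns_py_alt
  by_cases h : PySem.List.len items < threshold
  · rw [if_pos h, if_pos h]
  · rw [if_neg h, if_neg h]
    simp only [foldl_pair_counter, counters_eq_bigram, counters_eq_word]
    rw [pickLoopB_eq_take_genLoop _ _ _ _ (by simp), genLoop_append,
      ← selLoopA_eq_gen _ _ _ (sorted_bigram_space items), ← wordLoopA_eq_gen,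
      PySem.List.slice_to _ (by norm_num)]
    rfl

-- ===== VERDICT (by name: the statement is the Claim_ definition above) =====
theorem find_recurring_patterns_py_spec : Claim_equal_find_recurring_patterns_py := by
  intro items threshold _ _
  unfold Spec_find_recurring_patterns_py
  exact find_recurring_patterns_py_eq_alt items threshold
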